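-- pv_equiv track=rewrite | github.com/sivm205/Prepinsta-top-100 | p72.py | maximum_subarray_product
-- ===== SOURCE A (Python) =====
-- def get_prod(array): #it will product a subarray elements and return a total product
--     prod = 1
--     for i in array:
--         prod= prod*i
--     return prod
--
-- def maximum_subarray_product(array):
--     #first get the subarray in a separate list
--     subarray = []
--     product = []
--
--     for i in range(len(array)):  #fetch all the possible subarrays
--         for j in range(i,len(array)):
--             subarray.append((array[i:j+1]))
--
--     for i in subarray:
--         product.append(get_prod(i))
--
--
--     return product
-- ===== SOURCE B (Python) =====
-- def maximum_subarray_product(array):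
--     product = []
--     for i in range(len(array)):
--         p = 1
--         for x in array[i:]:
--             p *= x
--             product.append(p)
--     return product
-- ===== Notes on version B (the rewrite author's own statement) =====
-- stated objective: alternative
-- what changed: Instead of materialising every contiguous subarray and re-multiplying each from scratch, B keeps one running product per start index and emits it as it extends (intended as faster, O(n^2) work vs O(n^3); a timing run measured 17.8x at n=256 but could not confirm at the largest sizes, where the huge bignum products dominate both).
import Mathlib
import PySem

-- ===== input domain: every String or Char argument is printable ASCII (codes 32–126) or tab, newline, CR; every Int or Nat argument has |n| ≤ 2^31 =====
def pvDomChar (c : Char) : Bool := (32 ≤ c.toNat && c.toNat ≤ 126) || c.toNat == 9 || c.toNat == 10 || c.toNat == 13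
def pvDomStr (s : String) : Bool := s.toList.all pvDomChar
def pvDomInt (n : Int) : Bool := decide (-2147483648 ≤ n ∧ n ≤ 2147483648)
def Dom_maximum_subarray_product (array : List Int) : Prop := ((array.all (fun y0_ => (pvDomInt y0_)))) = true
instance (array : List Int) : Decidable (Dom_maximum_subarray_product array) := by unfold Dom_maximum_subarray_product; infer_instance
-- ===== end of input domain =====

-- B replaces A's materialise-every-subarray-then-reproduct scheme with one running product per start index.

-- ===== PORT A =====
def get_prod (array : List Int) : Int :=
  array.foldl (fun prod i => prod * i) 1

def maximum_subarray_product (array : List Int) : List Int :=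
  let subarray : List (List Int) :=
    (PySem.List.pyRange 0 (array.length : Int) 1).foldl (fun acc i =>
      (PySem.List.pyRange i (array.length : Int) 1).foldl (fun acc2 j =>
        acc2 ++ [PySem.List.slice array (some i) (some (j + 1))]) acc) []
  subarray.foldl (fun product s => product ++ [get_prod s]) []

-- ===== PORT B =====
def runProd (p : Int) (xs : List Int) (acc : List Int) : List Int :=
  match xs with
  | [] => acc
  | x :: t => runProd (p * x) t (acc ++ [p * x])

def maximum_subarray_product_alt (array : List Int) : List Int :=
  (PySem.List.pyRange 0 (array.length : Int) 1).foldl (fun product i =>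
    runProd 1 (PySem.List.slice array (some i) none) product) []

-- ===== PRECONDITION & SPEC =====
def Spec_maximum_subarray_product (array : List Int) (out : List Int) : Prop := out = maximum_subarray_product_alt array
instance (array : List Int) (out : List Int) : Decidable (Spec_maximum_subarray_product array out) := by unfold Spec_maximum_subarray_product; infer_instance

-- ===== CLAIM (what is proved, stated in full; the proofs are below) =====
def Claim_equal_maximum_subarray_product : Prop := ∀ (array : List Int), Dom_maximum_subarray_product array → Spec_maximum_subarray_product array (maximum_subarray_product array)

-- ===== LEMMAS AND PROOFS =====

theorem runProd_eq_append (xs : List Int) : ∀ (p : Int) (acc : List Int),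
    runProd p xs acc = acc ++ runProd p xs [] := by
  induction xs with
  | nil => intro p acc; simp [runProd]
  | cons x t ih =>
      intro p acc
      simp only [runProd]
      rw [ih (p * x) (acc ++ [p * x]), ih (p * x) ([] ++ [p * x])]
      simp

theorem runProd_eq_map (xs : List Int) : ∀ (p : Int),
    runProd p xs [] = (List.range xs.length).map (fun k => (xs.take (k + 1)).foldl (fun a b => a * b) p) := by
  induction xs with
  | nil => intro p; simp [runProd]
  | cons x t ih =>
      intro p
      have h1 : runProd p (x :: t) [] = runProd (p * x) t ([] ++ [p * x]) := rfl
      rw [h1, runProd_eq_append t (p * x) ([] ++ [p * x]), ih (p * x)]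
      rw [List.length_cons, List.range_succ_eq_map, List.map_cons, List.map_map, List.nil_append,
        List.singleton_append]
      congr 1

theorem maximum_subarray_product_spec : Claim_equal_maximum_subarray_product := by
  intro array _
  unfold Spec_maximum_subarray_product maximum_subarray_product maximum_subarray_product_alt
  have hBfun : (fun (product : List Int) (i : Int) =>
      runProd 1 (PySem.List.slice array (some i) none) product)
      = (fun product i => product ++ runProd 1 (PySem.List.slice array (some i) none) []) := by
    funext product i; exact runProd_eq_append _ _ _
  rw [hBfun]
  simp only [PySem.List.foldl_append_singleton_eq_map, PySem.List.foldl_append_eq_flatMap,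
    List.nil_append, List.map_flatMap]
  apply List.flatMap_congr
  intro i hi
  have hi' : 0 ≤ i ∧ i < (array.length : Int) := by
    simpa using (PySem.List.mem_pyRange_one.mp hi)
  rw [PySem.List.slice_from array hi'.1, runProd_eq_map]
  rw [PySem.List.pyRange_one i (array.length : Int), List.map_map]
  have hlen : ((array.length : Int) - i).toNat = (array.drop i.toNat).length := by
    simp; omega
  rw [hlen, List.map_map]
  apply List.map_congr_left
  intro k _
  have hsl : PySem.List.slice array (some i) (some (i + (k : Int) + 1))
      = (array.drop i.toNat).take (k + 1) := by
    rw [PySem.List.slice_toNat array hi'.1 (by omega)]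
    congr 1
    omega
  simp only [Function.comp, hsl, get_prod]
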